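-- pv_equiv track=rewrite | github.com/2719104587/Hallucination | hallucination/update_indel.py | update_paste_locs_list
-- ===== SOURCE A (Python) =====
-- import copy
--
-- def update_paste_locs_list(paste_locs_list, sample_type, idxs):
--     if sample_type == "mut":
--         return paste_locs_list
--     else:
--         paste_locs_list_copy = copy.deepcopy(paste_locs_list)
--         for idx in idxs:
--             for index, paste_loc in enumerate(paste_locs_list):
--                 if paste_loc[0] >= idx:
--                     if sample_type == "add":
--                         paste_locs_list_copy[index][0] += 1
--                     elif sample_type == "pop":
--                         paste_locs_list_copy[index][0] -= 1
--                 if paste_loc[1] > idx: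
--                     if sample_type == "add":
--                         paste_locs_list_copy[index][1] += 1
--                     elif sample_type == "pop":
--                         paste_locs_list_copy[index][1] -= 1
--         return paste_locs_list_copy
-- ===== SOURCE B (Python) =====
-- def _bisect_right(s, x):
--     # hand-written bisect.bisect_right (stdlib bisect is not imported by A's module)
--     lo, hi = 0, len(s)
--     while lo < hi:
--         mid = (lo + hi) // 2
--         if x < s[mid]:
--             hi = mid
--         else:
--             lo = mid + 1
--     return lo
--
--
-- def _bisect_left(s, x):
--     lo, hi = 0, len(s)
--     while lo < hi:
--         mid = (lo + hi) // 2
--         if s[mid] < x: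
--             lo = mid + 1
--         else:
--             hi = mid
--     return lo
--
--
-- def update_paste_locs_list(paste_locs_list, sample_type, idxs):
--     if sample_type == "mut":
--         return paste_locs_list
--     s = sorted(idxs)
--     if sample_type == "add":
--         d = 1
--     elif sample_type == "pop":
--         d = -1
--     else:
--         d = 0
--     out = []
--     for loc in paste_locs_list:
--         c0 = _bisect_right(s, loc[0])   # number of idxs <= loc[0]
--         c1 = _bisect_left(s, loc[1])    # number of idxs <  loc[1]
--         out.append([loc[0] + d * c0, loc[1] + d * c1] + loc[2:])
--     return out
-- ===== Notes on version B (the rewrite author's own statement) =====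
-- stated objective: faster
-- what changed: B sorts idxs once and counts qualifying indices per location with binary search (hand-written bisect, stdlib bisect not importable here), building each output row directly, instead of A's per-idx mutation pass over a deep copy.
-- outside the precondition, e.g. on update_paste_locs_list([[5]], 'add', []): A returns [[5]], B raises IndexError
import Mathlib
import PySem

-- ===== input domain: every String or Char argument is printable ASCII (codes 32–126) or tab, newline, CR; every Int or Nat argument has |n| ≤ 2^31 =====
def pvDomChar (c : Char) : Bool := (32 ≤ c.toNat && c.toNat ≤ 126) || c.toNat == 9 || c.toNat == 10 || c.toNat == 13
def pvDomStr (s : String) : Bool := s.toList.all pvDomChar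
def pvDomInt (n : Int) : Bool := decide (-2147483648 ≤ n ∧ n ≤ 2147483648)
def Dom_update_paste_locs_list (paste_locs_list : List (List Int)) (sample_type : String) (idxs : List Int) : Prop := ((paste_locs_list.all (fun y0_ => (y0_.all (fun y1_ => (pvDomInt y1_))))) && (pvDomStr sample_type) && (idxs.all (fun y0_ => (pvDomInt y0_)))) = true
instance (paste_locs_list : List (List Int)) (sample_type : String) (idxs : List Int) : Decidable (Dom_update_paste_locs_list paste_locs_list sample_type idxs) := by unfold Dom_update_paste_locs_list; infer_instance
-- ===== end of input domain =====

-- B replaces A's per-idx mutation pass over a deep copy by one sort of idxs plus a binary-search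
-- count per location (objective: faster). Return-value equivalence only: A returns its argument
-- unchanged for "mut" and otherwise mutates only a fresh deep copy, so no caller-visible mutation.

-- ===== PORT A =====
-- Python's `for index, paste_loc in enumerate(paste_locs_list): ... paste_locs_list_copy[index] ...`
-- is ported as a lockstep recursion over the original list and the copy: exact, because the copy
-- always has the same length as the original. `paste_loc[0]` / `paste_loc[1]` are pyGet? with a
-- .getD 0 default; the `none` case (Python IndexError) is excluded by Pre_update_paste_locs_list.
def pvAStep (sample_type : String) (idx : Int) : List (List Int) → List (List Int) → List (List Int)
  | [], copy => copy
  | _ :: _, [] => []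
  | paste_loc :: rest, row :: copyRest =>
      let row1 :=
        if (PySem.List.pyGet? paste_loc 0).getD 0 ≥ idx then
          if sample_type = "add" then row.modify 0 (· + 1)
          else if sample_type = "pop" then row.modify 0 (· - 1)
          else row
        else row
      let row2 :=
        if (PySem.List.pyGet? paste_loc 1).getD 0 > idx then
          if sample_type = "add" then row1.modify 1 (· + 1)
          else if sample_type = "pop" then row1.modify 1 (· - 1)
          else row1
        else row1
      row2 :: pvAStep sample_type idx rest copyRest

def update_paste_locs_list (paste_locs_list : List (List Int)) (sample_type : String) (idxs : List Int) : List (List Int) :=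
  if sample_type = "mut" then paste_locs_list
  else idxs.foldl (fun copy idx => pvAStep sample_type idx paste_locs_list copy) paste_locs_list

-- ===== PORT B =====
-- Source B's hand-written _bisect_right/_bisect_left are CPython's bisect loops; they are ported as
-- the PySem primitives, whose definition is exactly that lo/hi halving loop.
def update_paste_locs_list_alt (paste_locs_list : List (List Int)) (sample_type : String) (idxs : List Int) : List (List Int) :=
  if sample_type = "mut" then paste_locs_list
  else
    let s := PySem.List.sorted idxs (fun x => x)
    let d : Int := if sample_type = "add" then 1 else if sample_type = "pop" then -1 else 0
    paste_locs_list.map (fun loc =>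
      let x := (PySem.List.pyGet? loc 0).getD 0
      let y := (PySem.List.pyGet? loc 1).getD 0
      let c0 : Int := PySem.List.bisectRight s x
      let c1 : Int := PySem.List.bisectLeft s y
      [x + d * c0, y + d * c1] ++ PySem.List.slice loc (some 2) none)

-- ===== PRECONDITION & SPEC =====
-- Pre_ excludes inputs where sample_type ≠ "mut" and some location has fewer than 2 entries:
-- A raises IndexError there whenever idxs is non-empty, and when idxs is empty (A returns the
-- copy unchanged) B itself raises IndexError on loc[0]/loc[1].
def Pre_update_paste_locs_list (paste_locs_list : List (List Int)) (sample_type : String) (idxs : List Int) : Prop :=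
  sample_type = "mut" ∨ ∀ loc ∈ paste_locs_list, 2 ≤ loc.length
instance (paste_locs_list : List (List Int)) (sample_type : String) (idxs : List Int) : Decidable (Pre_update_paste_locs_list paste_locs_list sample_type idxs) := by unfold Pre_update_paste_locs_list; infer_instance

def pvWitness_update_paste_locs_list : List (List Int) × String × List Int := ([[1, 4], [0, 2]], "add", [1, 3])

def Spec_update_paste_locs_list (paste_locs_list : List (List Int)) (sample_type : String) (idxs : List Int) (out : List (List Int)) : Prop := out = update_paste_locs_list_alt paste_locs_list sample_type idxs
instance (paste_locs_list : List (List Int)) (sample_type : String) (idxs : List Int) (out : List (List Int)) : Decidable (Spec_update_paste_locs_list paste_locs_list sample_type idxs out) := by unfold Spec_update_paste_locs_list; infer_instance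

-- ===== CLAIM (what is proved, stated in full; the proofs are below) =====
def Claim_equal_update_paste_locs_list : Prop := ∀ (paste_locs_list : List (List Int)) (sample_type : String) (idxs : List Int), Dom_update_paste_locs_list paste_locs_list sample_type idxs → Pre_update_paste_locs_list paste_locs_list sample_type idxs → Spec_update_paste_locs_list paste_locs_list sample_type idxs (update_paste_locs_list paste_locs_list sample_type idxs)

-- ===== LEMMAS AND PROOFS =====

-- the shift applied per matching index: +1 for "add", -1 for "pop", 0 otherwise
def pvD (sample_type : String) : Int :=
  if sample_type = "add" then 1 else if sample_type = "pop" then -1 else 0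

-- one row update of A's inner loop, in additive form, on a row with at least two entries
theorem pvAStep_row (sample_type : String) (idx : Int) (a b : Int) (t : List Int)
    (a' b' : Int) (t' : List Int) :
    (let row1 :=
        if (PySem.List.pyGet? (a :: b :: t) 0).getD 0 ≥ idx then
          if sample_type = "add" then (a' :: b' :: t').modify 0 (· + 1)
          else if sample_type = "pop" then (a' :: b' :: t').modify 0 (· - 1)
          else (a' :: b' :: t')
        else (a' :: b' :: t')
      let row2 :=
        if (PySem.List.pyGet? (a :: b :: t) 1).getD 0 > idx then
          if sample_type = "add" then row1.modify 1 (· + 1)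
          else if sample_type = "pop" then row1.modify 1 (· - 1)
          else row1
        else row1
      row2)
    = (a' + (if idx ≤ a then pvD sample_type else 0))
      :: (b' + (if idx < b then pvD sample_type else 0)) :: t' := by
  simp only [PySem.List.pyGet?_zero_cons, Option.getD_some, pvD]
  have h1 : PySem.List.pyGet? (a :: b :: t) 1 = some b := by
    simp [PySem.List.pyGet?, PySem.List.pyIdx?]
  rw [h1]
  simp only [Option.getD_some]
  split_ifs <;> simp [List.modify] <;> omega

theorem pvAStep_map (sample_type : String) (idx : Int) (p : List (List Int))
    (f : List Int → List Int) :
    pvAStep sample_type idx p (p.map f)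
      = p.map (fun loc => pvAStep sample_type idx [loc] [f loc] |>.headI) := by
  induction p with
  | nil => simp [pvAStep]
  | cons loc rest ih => simp [pvAStep, ih]

theorem pvFoldA (sample_type : String) (p : List (List Int)) (idxs : List Int)
    (f : List Int → List Int) :
    idxs.foldl (fun copy idx => pvAStep sample_type idx p copy) (p.map f)
      = p.map (fun loc =>
          idxs.foldl (fun row idx => pvAStep sample_type idx [loc] [row] |>.headI) (f loc)) := by
  induction idxs generalizing f with
  | nil => simp
  | cons i is ih =>
      simp only [List.foldl_cons]
      rw [pvAStep_map, ih]

-- the inner row fold in closed form, for rows with at least two entries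
theorem pvRowFold (sample_type : String) (a b : Int) (t : List Int) (is : List Int)
    (a' b' : Int) (t' : List Int) :
    is.foldl (fun row idx => pvAStep sample_type idx [a :: b :: t] [row] |>.headI) (a' :: b' :: t')
      = (a' + pvD sample_type * (is.countP (fun i => decide (i ≤ a)) : Int))
        :: (b' + pvD sample_type * (is.countP (fun i => decide (i < b)) : Int)) :: t' := by
  induction is generalizing a' b' with
  | nil => simp
  | cons i is ih =>
      simp only [List.foldl_cons]
      have hstep : (pvAStep sample_type i [a :: b :: t] [a' :: b' :: t']).headI
          = (a' + (if i ≤ a then pvD sample_type else 0))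
            :: (b' + (if i < b then pvD sample_type else 0)) :: t' := by
        show (pvAStep sample_type i ((a :: b :: t) :: []) ((a' :: b' :: t') :: [])).headI = _
        rw [pvAStep]
        simp only [List.headI]
        exact pvAStep_row sample_type i a b t a' b' t'
      rw [hstep, ih]
      simp only [List.countP_cons, List.cons.injEq]
      refine ⟨?_, ?_, trivial⟩ <;> push_cast [decide_eq_true_eq] <;> split_ifs <;> ring

-- bisect counts for a sorted list, from the PySem specs
theorem pvBisectRight_count (s : List Int) (x : Int)
    (hs : s.Pairwise (fun p q => p ≤ q)) :
    (PySem.List.bisectRight s x : Nat) = s.countP (fun i => decide (i ≤ x)) := by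
  obtain ⟨hle, hlt, hgt⟩ := PySem.List.bisectRight_spec s x hs
  set k := PySem.List.bisectRight s x with hk
  have hsplit : s = s.take k ++ s.drop k := (List.take_append_drop k s).symm
  rw [hsplit, List.countP_append]
  have h1 : (s.take k).countP (fun i => decide (i ≤ x)) = k := by
    rw [List.countP_eq_length.mpr, List.length_take, Nat.min_eq_left hle]
    intro a ha
    obtain ⟨j, hj, rfl⟩ := List.mem_iff_getElem.mp ha
    have hjk : j < k := lt_of_lt_of_le hj (by simp [List.length_take])
    have hjlen : j < s.length := lt_of_lt_of_le hjk hle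
    have := hlt j hjlen hjk
    simpa [List.getElem_take] using this
  have h2 : (s.drop k).countP (fun i => decide (i ≤ x)) = 0 := by
    rw [List.countP_eq_zero]
    intro a ha
    obtain ⟨j, hj, rfl⟩ := List.mem_iff_getElem.mp ha
    have hlen : k + j < s.length := by
      have := hj; simp [List.length_drop] at this; omega
    have := hgt (k + j) hlen (Nat.le_add_right k j)
    simp only [List.getElem_drop]
    simpa using not_le.mpr this
  omega

theorem pvBisectLeft_count (s : List Int) (x : Int)
    (hs : s.Pairwise (fun p q => p ≤ q)) :
    (PySem.List.bisectLeft s x : Nat) = s.countP (fun i => decide (i < x)) := by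
  obtain ⟨hle, hlt, hgt⟩ := PySem.List.bisectLeft_spec s x hs
  set k := PySem.List.bisectLeft s x with hk
  have hsplit : s = s.take k ++ s.drop k := (List.take_append_drop k s).symm
  rw [hsplit, List.countP_append]
  have h1 : (s.take k).countP (fun i => decide (i < x)) = k := by
    rw [List.countP_eq_length.mpr, List.length_take, Nat.min_eq_left hle]
    intro a ha
    obtain ⟨j, hj, rfl⟩ := List.mem_iff_getElem.mp ha
    have hjk : j < k := lt_of_lt_of_le hj (by simp [List.length_take])
    have hjlen : j < s.length := lt_of_lt_of_le hjk hle
    have := hlt j hjlen hjk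
    simpa [List.getElem_take] using this
  have h2 : (s.drop k).countP (fun i => decide (i < x)) = 0 := by
    rw [List.countP_eq_zero]
    intro a ha
    obtain ⟨j, hj, rfl⟩ := List.mem_iff_getElem.mp ha
    have hlen : k + j < s.length := by
      have := hj; simp [List.length_drop] at this; omega
    have := hgt (k + j) hlen (Nat.le_add_right k j)
    simp only [List.getElem_drop]
    simpa using not_lt.mpr this
  omega

-- ===== VERDICT (by name: the statement is the Claim_ definition above) =====
theorem update_paste_locs_list_spec : Claim_equal_update_paste_locs_list := by
  intro p st idxs _ hpre
  unfold Spec_update_paste_locs_list update_paste_locs_list update_paste_locs_list_alt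
  by_cases hmut : st = "mut"
  · simp [hmut]
  · rcases hpre with hpre | hlen
    · exact absurd hpre hmut
    simp only [if_neg hmut]
    have key := pvFoldA st p idxs id
    simp only [List.map_id, id_eq] at key
    rw [key]
    apply List.map_congr_left
    intro loc hloc
    have h2 := hlen loc hloc
    match loc, h2 with
    | a :: b :: t, _ =>
      rw [pvRowFold]
      have hs := PySem.List.sorted_pairwise idxs (fun x => x)
      have hperm : (PySem.List.sorted idxs (fun x => x)).Perm idxs :=
        PySem.List.sorted_perm idxs (fun x => x) false
      have hx : PySem.List.pyGet? (a :: b :: t) 0 = some a := PySem.List.pyGet?_zero_cons a _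
      have hy : PySem.List.pyGet? (a :: b :: t) 1 = some b := by
        simp [PySem.List.pyGet?, PySem.List.pyIdx?]
      simp only [hx, hy, Option.getD_some]
      have hc0 : (PySem.List.bisectRight (PySem.List.sorted idxs (fun x => x)) a : Nat)
          = idxs.countP (fun i => decide (i ≤ a)) := by
        rw [pvBisectRight_count _ _ hs]
        exact hperm.countP_eq _
      have hc1 : (PySem.List.bisectLeft (PySem.List.sorted idxs (fun x => x)) b : Nat)
          = idxs.countP (fun i => decide (i < b)) := by
        rw [pvBisectLeft_count _ _ hs]
        exact hperm.countP_eq _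
      have hslice : PySem.List.slice (a :: b :: t) (some 2) none = t := by
        simp [PySem.List.slice]
      rw [hslice, hc0, hc1]
      simp [pvD]
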